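-- pv_equiv track=rewrite | github.com/oneishaansharma/interviewPractice | Recursion/array220.py | array220
-- ===== SOURCE A (Python) =====
-- def array220(array, idx):
-- 	if(len(array)<2): return False
-- 	if (idx>=len(array)-1):
-- 		return False
-- 	else:
-- 		if(array[idx]*10 == array[idx+1]):
-- 			return True
-- 		else:
-- 			return array220(array,idx+1)
-- ===== SOURCE B (Python) =====
-- def array220(array, idx):
--     if len(array) < 2:
--         return False
--     window = [array[i] for i in range(idx, len(array))]
--     return any(a * 10 == b for a, b in zip(window, window[1:]))
-- ===== Notes on version B (the rewrite author's own statement) =====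
-- stated objective: alternative
-- what changed: Replaced A's tail recursion over idx by materialising the element window [array[i] for i in range(idx, len(array))] once and scanning its adjacent pairs with zip, with a single len<2 guard.
import Mathlib
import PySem

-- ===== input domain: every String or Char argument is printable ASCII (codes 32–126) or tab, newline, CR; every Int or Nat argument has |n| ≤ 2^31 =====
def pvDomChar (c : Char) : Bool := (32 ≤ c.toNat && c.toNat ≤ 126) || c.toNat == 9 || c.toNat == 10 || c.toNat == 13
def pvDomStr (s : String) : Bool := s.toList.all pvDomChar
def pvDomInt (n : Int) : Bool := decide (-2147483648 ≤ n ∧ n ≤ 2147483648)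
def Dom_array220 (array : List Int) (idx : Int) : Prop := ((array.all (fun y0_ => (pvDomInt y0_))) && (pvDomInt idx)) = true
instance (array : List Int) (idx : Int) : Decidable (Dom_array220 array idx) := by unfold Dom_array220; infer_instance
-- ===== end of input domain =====

-- B replaces A's tail recursion over idx by first materialising the suffix of elements
-- (window, one comprehension) and then scanning its adjacent pairs (zip window window[1:]);
-- same return value wherever A returns (Pre_ excludes A's IndexError inputs).

-- ===== PORT A =====
-- array[i] ported as pyGetD … 0: inside Pre_ every access is in range, so the default is never used.
def array220 (array : List Int) (idx : Int) : Bool :=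
  if array.length < 2 then false
  else if idx ≥ (array.length : Int) - 1 then false
  else if PySem.List.pyGetD array idx 0 * 10 = PySem.List.pyGetD array (idx + 1) 0 then true
  else array220 array (idx + 1)
termination_by ((array.length : Int) - idx).toNat
decreasing_by omega

-- ===== PORT B =====
def array220_alt (array : List Int) (idx : Int) : Bool :=
  if array.length < 2 then false
  else
    let window := (PySem.List.pyRange idx (array.length : Int) 1).map
      (fun i => PySem.List.pyGetD array i 0)
    (window.zip (PySem.List.slice window (some 1) none)).any (fun p => p.1 * 10 = p.2)

-- ===== PRECONDITION & SPEC =====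
-- Pre_ excludes exactly the inputs where Python A (and B alike) raises IndexError: len ≥ 2 and idx < len-1 and idx < -len.
def Pre_array220 (array : List Int) (idx : Int) : Prop :=
  array.length < 2 ∨ idx ≥ (array.length : Int) - 1 ∨ -(array.length : Int) ≤ idx
instance (array : List Int) (idx : Int) : Decidable (Pre_array220 array idx) := by unfold Pre_array220; infer_instance
def pvWitness_array220 : List Int × Int := ([1, 10, 3], 0)

def Spec_array220 (array : List Int) (idx : Int) (out : Bool) : Prop := out = array220_alt array idx
instance (array : List Int) (idx : Int) (out : Bool) : Decidable (Spec_array220 array idx out) := by unfold Spec_array220; infer_instance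

-- ===== CLAIM (what is proved, stated in full; the proofs are below) =====
def Claim_equal_array220 : Prop := ∀ (array : List Int) (idx : Int), Dom_array220 array idx → Pre_array220 array idx → Spec_array220 array idx (array220 array idx)

-- ===== LEMMAS AND PROOFS =====

-- window[1:] is the tail of the window.
theorem slice_one_none {α : Type} (xs : List α) :
    PySem.List.slice xs (some 1) none = xs.drop 1 := by
  have : ((1:Nat):Int) = (1:Int) := by norm_num
  rw [← this, PySem.List.slice_from_natCast]

-- The ports are in fact equal on all inputs (both totalize out-of-range access with the default 0).
theorem array220_eq_alt (array : List Int) (idx : Int) : array220 array idx = array220_alt array idx := by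
  rw [array220]
  by_cases hlen : array.length < 2
  · simp [array220_alt, hlen]
  · by_cases hend : idx ≥ (array.length : Int) - 1
    · rw [if_neg hlen, if_pos hend]
      simp only [array220_alt, if_neg hlen]
      by_cases hn : idx ≥ (array.length : Int)
      · simp [PySem.List.pyRange_one_eq_nil (by omega : (array.length : Int) ≤ idx)]
      · rw [PySem.List.pyRange_one_cons (by omega),
          PySem.List.pyRange_one_eq_nil (by omega : (array.length : Int) ≤ idx + 1)]
        simp [slice_one_none]
    · rw [if_neg hlen, if_neg hend]
      have h1 : PySem.List.pyRange idx (array.length : Int) 1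
          = idx :: PySem.List.pyRange (idx + 1) (array.length : Int) 1 :=
        PySem.List.pyRange_one_cons (by omega)
      have h2 : PySem.List.pyRange (idx + 1) (array.length : Int) 1
          = (idx + 1) :: PySem.List.pyRange (idx + 1 + 1) (array.length : Int) 1 :=
        PySem.List.pyRange_one_cons (by omega)
      have hrec := array220_eq_alt array (idx + 1)
      rw [array220_alt, if_neg hlen] at hrec ⊢
      simp only [h1, h2, List.map_cons, slice_one_none, List.drop_succ_cons, List.drop_zero,
        List.zip_cons_cons, List.any_cons] at hrec ⊢
      by_cases hp : PySem.List.pyGetD array idx 0 * 10 = PySem.List.pyGetD array (idx + 1) 0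
      · simp [hp]
      · simp only [if_neg hp, hrec]
        simp [hp]
termination_by ((array.length : Int) - idx).toNat
decreasing_by omega

-- ===== VERDICT (by name: the statement is the Claim_ definition above) =====
theorem array220_spec : Claim_equal_array220 := by
  intro array idx _ _
  unfold Spec_array220
  exact array220_eq_alt array idx
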